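-- pv_equiv track=rewrite | github.com/emiconpar/envdiff | envdiff/redactor.py | redact_keys
-- ===== SOURCE A (Python) =====
-- from typing import Dict, List, Optional
--
-- DEFAULT_MASK = "***REDACTED***"
--
-- def redact_keys(
--     env: Dict[str, str],
--     keys: List[str],
--     mask: str = DEFAULT_MASK,
-- ) -> Dict[str, str]:
--     """Return a copy of env with specific keys masked."""
--     key_set = set(keys)
--     return {
--         key: (mask if key in key_set else value)
--         for key, value in env.items()
--     }
-- ===== SOURCE B (Python) =====
-- from typing import Dict, List
--
-- DEFAULT_MASK = "***REDACTED***"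
--
-- def _overwrite(result: Dict[str, str], key: str, mask: str) -> None:
--     """Mask one key in place, only if it already exists."""
--     if key in result:
--         result[key] = mask
--
-- def _mask_all(result: Dict[str, str], keys: List[str], mask: str) -> Dict[str, str]:
--     """Recurse over the keys list, masking each present key in the copy."""
--     if not keys:
--         return result
--     _overwrite(result, keys[0], mask)
--     return _mask_all(result, keys[1:], mask)
--
-- def redact_keys(
--     env: Dict[str, str],
--     keys: List[str],
--     mask: str = DEFAULT_MASK,
-- ) -> Dict[str, str]:
--     """Return a copy of env with specific keys masked (copy, then recursive overwrite)."""
--     return _mask_all(dict(env), list(keys), mask)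
-- ===== Notes on version B (the rewrite author's own statement) =====
-- stated objective: alternative
-- what changed: A rebuilds the dict in one comprehension over env.items(), testing each key against a set; B instead makes a shallow copy of env and recurses over the keys list, overwriting in the copy each key that is already present.
import Mathlib
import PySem

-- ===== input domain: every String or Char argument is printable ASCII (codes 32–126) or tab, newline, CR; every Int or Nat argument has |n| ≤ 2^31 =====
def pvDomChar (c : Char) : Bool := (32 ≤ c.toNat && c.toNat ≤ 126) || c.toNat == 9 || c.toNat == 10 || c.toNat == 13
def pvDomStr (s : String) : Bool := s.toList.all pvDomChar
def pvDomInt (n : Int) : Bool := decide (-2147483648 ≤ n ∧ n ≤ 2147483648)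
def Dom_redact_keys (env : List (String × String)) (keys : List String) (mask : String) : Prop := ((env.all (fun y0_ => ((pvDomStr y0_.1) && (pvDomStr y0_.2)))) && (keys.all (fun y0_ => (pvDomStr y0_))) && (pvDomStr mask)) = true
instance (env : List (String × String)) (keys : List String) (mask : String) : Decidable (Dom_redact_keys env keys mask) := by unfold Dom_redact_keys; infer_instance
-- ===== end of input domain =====

-- B replaces A's single comprehension over env.items() with copy-then-recursive-overwrite over the keys list (alternative decomposition, same cost).


-- ===== PORT A =====
-- key_set = set(keys); {key: (mask if key in key_set else value) for key, value in env.items()}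
def redact_keys (env : List (String × String)) (keys : List String) (mask : String) : List (String × String) :=
  let keySet : PySem.Set String := PySem.Set.ofList keys
  env.map (fun p => (p.1, if PySem.Set.contains keySet p.1 then mask else p.2))

-- ===== PORT B =====
-- _overwrite: mask one key in place, only if it already exists
def overwriteOne (result : PySem.Dict String String) (key : String) (mask : String) :
    PySem.Dict String String :=
  if result.contains key then result.insert key mask else result

-- _mask_all: recurse over the keys list, masking each present key in the copy
def maskAll (result : PySem.Dict String String) : List String → String → PySem.Dict String String
  | [], _ => result
  | k :: ks, mask => maskAll (overwriteOne result k mask) ks mask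

-- redact_keys: return _mask_all(dict(env), list(keys), mask)
def redact_keys_alt (env : List (String × String)) (keys : List String) (mask : String) : List (String × String) :=
  (maskAll (PySem.Dict.ofList env) keys mask).items

-- ===== PRECONDITION & SPEC =====
-- Pre_ excludes association lists in which env carries a duplicate key: such lists do not
-- represent any Python dict (a dict's keys are unique), so neither program is ever run on them.
def distinctKeys : List String → Bool
  | [] => true
  | k :: ks => !(ks.contains k) && distinctKeys ks
def Pre_redact_keys (env : List (String × String)) (keys : List String) (mask : String) : Prop :=
  distinctKeys (env.map Prod.fst) = true
instance (env : List (String × String)) (keys : List String) (mask : String) : Decidable (Pre_redact_keys env keys mask) := by unfold Pre_redact_keys; infer_instance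

def pvWitness_redact_keys : (List (String × String)) × List String × String :=
  ([("HOME", "/root"), ("TOKEN", "s3cret")], ["TOKEN", "PATH"], "***REDACTED***")

def Spec_redact_keys (env : List (String × String)) (keys : List String) (mask : String) (out : List (String × String)) : Prop := out = redact_keys_alt env keys mask
instance (env : List (String × String)) (keys : List String) (mask : String) (out : List (String × String)) : Decidable (Spec_redact_keys env keys mask out) := by unfold Spec_redact_keys; infer_instance

-- ===== CLAIM (what is proved, stated in full; the proofs are below) =====
def Claim_equal_redact_keys : Prop := ∀ (env : List (String × String)) (keys : List String) (mask : String), Dom_redact_keys env keys mask → Pre_redact_keys env keys mask → Spec_redact_keys env keys mask (redact_keys env keys mask)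

-- ===== LEMMAS AND PROOFS =====

theorem distinctKeys_iff_nodup (l : List String) : distinctKeys l = true ↔ l.Nodup := by
  induction l with
  | nil => simp [distinctKeys]
  | cons k ks ih =>
    simp only [distinctKeys, Bool.and_eq_true, Bool.not_eq_true', List.nodup_cons, ih]
    simp [List.contains_eq_mem]

-- dict(env) of a duplicate-free association list has exactly env as its items
theorem ofList_items_of_nodup (env : List (String × String))
    (h : (env.map Prod.fst).Nodup) : (PySem.Dict.ofList env).items = env := by
  show (PySem.Dict.empty.update env).items = env
  unfold PySem.Dict.update
  rw [PySem.Dict.items_foldl_insert_fresh env Prod.fst Prod.snd PySem.Dict.empty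
        (fun a _ => PySem.Dict.contains_empty a.1) h]
  simp [PySem.Dict.empty]

-- B's recursive overwrite pass, characterised as a map over the dict's items
theorem maskAll_items (keys : List String) (mask : String)
    (d : PySem.Dict String String) (hnd : d.keys.Nodup) :
    (maskAll d keys mask).items
      = d.items.map (fun p => (p.1, if keys.contains p.1 then mask else p.2)) := by
  induction keys generalizing d with
  | nil => simp [maskAll]
  | cons k ks ih =>
    simp only [maskAll, overwriteOne]
    by_cases hc : d.contains k = true
    · rw [if_pos hc, ih _ (PySem.Dict.nodup_keys_insert d k mask hnd),
        PySem.Dict.items_insert_of_contains d mask hc, List.map_map]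
      refine List.map_congr_left fun p _ => ?_
      by_cases hk : p.1 = k
      · simp [hk]
      · simp [hk, beq_iff_eq]
    · rw [if_neg hc, ih _ hnd]
      refine List.map_congr_left fun p hp => ?_
      have hpk : p.1 ≠ k := by
        intro he
        have : d.contains p.1 = true := by
          rw [PySem.Dict.contains_iff_mem_keys]
          exact List.mem_map_of_mem hp
        rw [he] at this; exact absurd this (by simp [hc])
      simp [hpk]

-- ===== VERDICT (by name: the statement is the Claim_ definition above) =====
theorem redact_keys_spec : Claim_equal_redact_keys := by
  intro env keys mask _ hpre
  unfold Spec_redact_keys redact_keys redact_keys_alt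
  have hnd : (PySem.Dict.ofList env).keys.Nodup := PySem.Dict.nodup_keys_ofList env
  rw [maskAll_items keys mask _ hnd, ofList_items_of_nodup env ((distinctKeys_iff_nodup _).mp hpre)]
  refine (List.map_congr_left fun p _ => ?_).symm
  have h1 : PySem.Set.contains (PySem.Set.ofList keys) p.1 = keys.contains p.1 := by
    simp [PySem.Set.contains_eq_listContains, PySem.Set.mem_ofList]
  rw [h1]
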